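-- pv_equiv track=rewrite | github.com/Kodanda10/Pinak_Projects | src/pinak/context/broker/world_beating_retrieval.py | _extract_phrases
-- ===== SOURCE A (Python) =====
-- from typing import Dict, List, Optional, Any, AsyncIterator, Set, Tuple, Union
--
-- def _extract_phrases(text: str) -> List[str]:
--     """Extract meaningful phrases from text."""
--     words = text.split()
--     phrases = []
--
--     # Extract 2-3 word phrases
--     for i in range(len(words) - 1):
--         phrases.append(f"{words[i]} {words[i+1]}")
--         if i < len(words) - 2:
--             phrases.append(f"{words[i]} {words[i+1]} {words[i+2]}")
--
--     return phrases
-- ===== SOURCE B (Python) =====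
-- def _extract_phrases(text):
--     """Extract meaningful phrases from text."""
--     rev = []
--     nxt = nxt2 = None  # the one resp. two words that FOLLOW the current word
--     for w in reversed(text.split()):
--         if nxt is not None:
--             if nxt2 is not None:
--                 rev.append(f"{w} {nxt} {nxt2}")
--             rev.append(f"{w} {nxt}")
--         nxt2 = nxt
--         nxt = w
--     rev.reverse()
--     return rev
-- ===== Notes on version B (the rewrite author's own statement) =====
-- stated objective: alternative
-- what changed: A scans word indices forward, testing bounds against len(words) to emit a bigram then maybe a trigram at each index; B makes a single backward pass over the words keeping the two following words in a sliding window (no indices or length tests), appends each trigram before its bigram, and reverses the accumulated list once at the end.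
import Mathlib
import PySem

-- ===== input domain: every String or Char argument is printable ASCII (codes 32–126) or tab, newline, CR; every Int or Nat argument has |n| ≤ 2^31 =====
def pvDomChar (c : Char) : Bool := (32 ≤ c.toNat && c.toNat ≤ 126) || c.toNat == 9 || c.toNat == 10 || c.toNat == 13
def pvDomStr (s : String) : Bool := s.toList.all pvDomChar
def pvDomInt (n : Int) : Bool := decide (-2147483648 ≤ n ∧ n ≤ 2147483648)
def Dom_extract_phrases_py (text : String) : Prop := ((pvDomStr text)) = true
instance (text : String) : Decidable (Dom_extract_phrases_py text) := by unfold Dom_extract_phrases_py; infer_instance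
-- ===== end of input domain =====

-- B replaces A's forward index loop (with length-based bound tests) by a single backward
-- pass keeping the two following words in a sliding window, appending trigram-before-bigram
-- and reversing once at the end; same cost, different algorithm shape.

-- ===== PORT A =====
def extract_phrases_py (text : String) : List String :=
  let words := PySem.Str.split₀ text
  (PySem.List.pyRange 0 ((words.length : Int) - 1) 1).foldl
    (fun phrases i =>
      let phrases := phrases ++
        [PySem.List.pyGetD words i "" ++ " " ++ PySem.List.pyGetD words (i + 1) ""]
      if i < (words.length : Int) - 2 then
        phrases ++
          [PySem.List.pyGetD words i "" ++ " " ++ PySem.List.pyGetD words (i + 1) "" ++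
            " " ++ PySem.List.pyGetD words (i + 2) ""]
      else phrases) []

-- ===== PORT B =====
-- one backward step: w is the current word, st = (accumulated reversed output, word after w, second word after w)
def pvStep (st : List String × Option String × Option String) (w : String) :
    List String × Option String × Option String :=
  let rev := match st.2.1 with
    | none => st.1
    | some n =>
      let rev := match st.2.2 with
        | none => st.1
        | some n2 => st.1 ++ [w ++ " " ++ n ++ " " ++ n2]
      rev ++ [w ++ " " ++ n]
  (rev, some w, st.2.1)

def extract_phrases_py_alt (text : String) : List String :=
  let words := PySem.Str.split₀ text
  (words.reverse.foldl pvStep ([], none, none)).1.reverse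

-- ===== PRECONDITION & SPEC =====
def Spec_extract_phrases_py (text : String) (out : List String) : Prop := out = extract_phrases_py_alt text
instance (text : String) (out : List String) : Decidable (Spec_extract_phrases_py text out) := by unfold Spec_extract_phrases_py; infer_instance

-- ===== CLAIM =====
def Claim_equal_extract_phrases_py : Prop := ∀ (text : String), Dom_extract_phrases_py text → Spec_extract_phrases_py text (extract_phrases_py text)

-- ===== LEMMAS AND PROOFS =====

-- the common reference value, by structural recursion on the word list
def pvPhr : List String → List String
  | a :: b :: c :: t => (a ++ " " ++ b) :: (a ++ " " ++ b ++ " " ++ c) :: pvPhr (b :: c :: t)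
  | [a, b] => [a ++ " " ++ b]
  | _ => []

theorem pvFoldlInterleave {α : Type} (bi ti : α → String) (cond : α → Prop) [DecidablePred cond]
    (l : List α) (acc : List String) :
    List.foldl (fun ph x => if cond x then (ph ++ [bi x]) ++ [ti x] else ph ++ [bi x]) acc l
      = acc ++ l.flatMap (fun x => if cond x then [bi x, ti x] else [bi x]) := by
  induction l generalizing acc with
  | nil => simp
  | cons x xs ih => simp only [List.foldl_cons, List.flatMap_cons, ih]; split_ifs <;> simp

-- A-side: the flatMap over indices equals pvPhr
theorem pvA_flatMap (ws : List String) :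
    (List.range ((ws.length : Int) - 1).toNat).flatMap
      (fun (k : Nat) =>
        if ((k : Int) < (ws.length : Int) - 2) then
          [PySem.List.pyGetD ws (k : Int) "" ++ " " ++ PySem.List.pyGetD ws ((k : Int) + 1) "",
           PySem.List.pyGetD ws (k : Int) "" ++ " " ++ PySem.List.pyGetD ws ((k : Int) + 1) "" ++
             " " ++ PySem.List.pyGetD ws ((k : Int) + 2) ""]
        else
          [PySem.List.pyGetD ws (k : Int) "" ++ " " ++ PySem.List.pyGetD ws ((k : Int) + 1) ""]) =
    pvPhr ws := by
  induction ws with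
  | nil => simp [pvPhr]
  | cons a t ih =>
    cases t with
    | nil => simp [pvPhr]
    | cons b u =>
      have hlen : (((a :: b :: u).length : Int) - 1).toNat = u.length + 1 := by
        simp
      rw [hlen, List.range_succ_eq_map, List.flatMap_cons, List.flatMap_map]
      have htail :
          (List.range u.length).flatMap
            (fun (k : Nat) =>
              if (((k.succ : Nat) : Int) < ((a :: b :: u).length : Int) - 2) then
                [PySem.List.pyGetD (a :: b :: u) ((k.succ : Nat) : Int) "" ++ " " ++ PySem.List.pyGetD (a :: b :: u) (((k.succ : Nat) : Int) + 1) "",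
                 PySem.List.pyGetD (a :: b :: u) ((k.succ : Nat) : Int) "" ++ " " ++ PySem.List.pyGetD (a :: b :: u) (((k.succ : Nat) : Int) + 1) "" ++
                   " " ++ PySem.List.pyGetD (a :: b :: u) (((k.succ : Nat) : Int) + 2) ""]
              else
                [PySem.List.pyGetD (a :: b :: u) ((k.succ : Nat) : Int) "" ++ " " ++ PySem.List.pyGetD (a :: b :: u) (((k.succ : Nat) : Int) + 1) ""]) =
          pvPhr (b :: u) := by
        have hlen2 : (((b :: u).length : Int) - 1).toNat = u.length := by simp
        rw [← ih, hlen2]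
        apply List.flatMap_congr
        intro k hk
        have hget : ∀ (j : Nat), PySem.List.pyGetD (a :: b :: u) ((j : Int) + 1) "" =
            PySem.List.pyGetD (b :: u) ((j : Nat) : Int) "" := by
          intro j
          rw [show ((j : Int) + 1) = (((j + 1 : Nat)) : Int) by push_cast; ring]
          rw [PySem.List.pyGetD_natCast, PySem.List.pyGetD_natCast]
          simp [List.getD]
        have e0 := hget k
        have e1 := hget (k + 1)
        have e2 := hget (k + 2)
        push_cast at e0 e1 e2 ⊢
        rw [e0, show (k : Int) + 1 + 1 = ((k : Int) + 1) + 1 by ring, e1,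
            show (k : Int) + 1 + 2 = ((k : Int) + 2) + 1 by ring, e2]
        by_cases hc : ((k : Int) < ((b :: u).length : Int) - 2)
        · rw [if_pos (by omega), if_pos hc]
        · rw [if_neg (by omega), if_neg hc]
      rw [htail]
      cases u with
      | nil =>
        simp [PySem.List.pyGetD, PySem.List.pyGet?, PySem.List.pyIdx?, pvPhr]
      | cons c v =>
        have hc : (((0 : Nat) : Int) < ((a :: b :: c :: v).length : Int) - 2) := by simp only [List.length_cons]; omega
        rw [if_pos hc]
        have t2 : (2 : Int) ≤ (v.length : Int) + 1 + 1 := by omega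
        have t1 : (0 : Int) ≤ (v.length : Int) + 1 := by omega
        have t0 : (0 : Int) ≤ (v.length : Int) + 1 + 1 := by omega
        simp [PySem.List.pyGetD, PySem.List.pyGet?, PySem.List.pyIdx?, pvPhr, t0, t1, t2]

-- B-side: the backward fold maintains (reversed pvPhr, next word, next-next word)
theorem pvB_foldr (ws : List String) :
    ws.foldr (fun w st => pvStep st w) ([], none, none) =
      ((pvPhr ws).reverse, ws.head?, ws[1]?) := by
  induction ws with
  | nil => rfl
  | cons a t ih =>
    rw [List.foldr_cons, ih]
    cases t with
    | nil => simp [pvStep, pvPhr]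
    | cons b u =>
      cases u with
      | nil => simp [pvStep, pvPhr]
      | cons c v => simp [pvStep, pvPhr]

theorem pv_main (ws : List String) :
    (PySem.List.pyRange 0 ((ws.length : Int) - 1) 1).foldl
      (fun phrases i =>
        let phrases := phrases ++
          [PySem.List.pyGetD ws i "" ++ " " ++ PySem.List.pyGetD ws (i + 1) ""]
        if i < (ws.length : Int) - 2 then
          phrases ++
            [PySem.List.pyGetD ws i "" ++ " " ++ PySem.List.pyGetD ws (i + 1) "" ++
              " " ++ PySem.List.pyGetD ws (i + 2) ""]
        else phrases) [] =
    (ws.reverse.foldl pvStep ([], none, none)).1.reverse := by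
  have hB : ws.reverse.foldl pvStep ([], none, none) =
      ws.foldr (fun w st => pvStep st w) ([], none, none) := by
    rw [List.foldl_reverse]
  rw [hB, pvB_foldr]
  simp only [List.reverse_reverse]
  have hA := pvFoldlInterleave
    (fun i => PySem.List.pyGetD ws i "" ++ " " ++ PySem.List.pyGetD ws (i + 1) "")
    (fun i => PySem.List.pyGetD ws i "" ++ " " ++ PySem.List.pyGetD ws (i + 1) "" ++
      " " ++ PySem.List.pyGetD ws (i + 2) "")
    (fun i => i < (ws.length : Int) - 2)
    (PySem.List.pyRange 0 ((ws.length : Int) - 1) 1) []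
  simp only [] at hA
  apply Eq.trans hA
  rw [List.nil_append, PySem.List.pyRange_one, List.flatMap_map]
  refine Eq.trans ?_ (pvA_flatMap ws)
  have h0 : ((ws.length : Int) - 1 - 0).toNat = ((ws.length : Int) - 1).toNat := by norm_num
  rw [h0]
  apply List.flatMap_congr
  intro k _
  simp only [zero_add]

-- ===== VERDICT =====
theorem extract_phrases_py_spec : Claim_equal_extract_phrases_py := by
  intro text _
  unfold Spec_extract_phrases_py extract_phrases_py extract_phrases_py_alt
  exact pv_main (PySem.Str.split₀ text)
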